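-- pv_equiv track=rewrite | github.com/arcan1s/ahriman | src/ahriman/models/pkgbuild_patch.py | unquote
-- ===== SOURCE A (Python) =====
-- from typing import Any, Iterator, Self
--
-- def unquote(source: str) -> str:
--     """
--     like :func:`shlex.quote()`, but opposite
--
--     Args:
--         source(str): source string to remove quotes
--
--     Returns:
--         str: string with quotes removed
--
--     Raises:
--         ValueError: if no closing quotation
--     """
--
--     def generator() -> Iterator[str]:
--         token = None
--         for char in source:
--             if token is not None:
--                 if char == token:
--                     token = None  # closed quote
--                 else:
--                     yield char  # character inside quotes
--             elif char in ("'", "\""):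
--                 token = char  # first quote found
--             else:
--                 yield char  # normal character
--
--         if token is not None:
--             raise ValueError("No closing quotation")
--
--     return "".join(generator())
-- ===== SOURCE B (Python) =====
-- def unquote(source: str) -> str:
--     """Span-scanning unquote: seek each closing quote with str.find instead of a per-char state machine."""
--     result = []
--     i = 0
--     n = len(source)
--     while i < n:
--         char = source[i]
--         if char in ("'", "\""):
--             closing = source.find(char, i + 1)
--             if closing == -1:
--                 raise ValueError("No closing quotation")
--             result.append(source[i + 1:closing])
--             i = closing + 1
--         else:
--             result.append(char)
--             i += 1
--     return "".join(result)
-- ===== Notes on version B (the rewrite author's own statement) =====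
-- stated objective: alternative
-- what changed: Replaces the per-character quote-state generator with a span scanner that jumps to each matching closing quote via str.find and copies whole slices; raises the same ValueError when find returns -1.
-- outside the precondition, e.g. on unquote("a'bc"): A raises ValueError, B raises ValueError
import Mathlib
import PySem

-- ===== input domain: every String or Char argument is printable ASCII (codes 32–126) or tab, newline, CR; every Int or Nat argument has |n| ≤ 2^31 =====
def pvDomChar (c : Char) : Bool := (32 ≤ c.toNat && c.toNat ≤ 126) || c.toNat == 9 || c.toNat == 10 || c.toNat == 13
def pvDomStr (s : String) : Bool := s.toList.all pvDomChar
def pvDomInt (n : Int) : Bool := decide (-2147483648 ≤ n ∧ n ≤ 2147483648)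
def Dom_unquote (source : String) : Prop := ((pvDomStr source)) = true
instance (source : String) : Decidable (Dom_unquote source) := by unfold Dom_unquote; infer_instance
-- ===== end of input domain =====

-- B replaces A's per-character quote-state machine by a span scanner that seeks each
-- closing quote and copies whole spans (objective: alternative decomposition, same cost).

-- ===== PORT A =====
-- A's generator: `token` is the pending open quote; `none` result = ValueError("No closing quotation").
def unquoteAuxA : Option Char → List Char → Option (List Char)
  | some t, c :: rest =>
      if c = t then unquoteAuxA none rest
      else (fun l => c :: l) <$> unquoteAuxA (some t) rest
  | none, c :: rest =>
      if c = '\'' ∨ c = '"' then unquoteAuxA (some c) rest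
      else (fun l => c :: l) <$> unquoteAuxA none rest
  | some _, [] => none
  | none, [] => some []

-- On Pre_ (no unclosed quote) the generator never raises; `.getD []` only totalizes outside Pre_.
def unquote (source : String) : String :=
  ((unquoteAuxA none source.toList).getD []).asString

-- ===== PORT B =====
-- source.find(q, i+1): split `rest` at the first occurrence of `q`; none = find returned -1.
def findSplit (q : Char) : List Char → Option (List Char × List Char)
  | [] => none
  | c :: rest =>
      if c = q then some ([], rest)
      else (fun p => (c :: p.1, p.2)) <$> findSplit q rest

theorem findSplit_len {q : Char} : ∀ {l b a : List Char},
    findSplit q l = some (b, a) → a.length < l.length := by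
  intro l
  induction l with
  | nil => intro b a h; simp [findSplit] at h
  | cons c rest ih =>
      intro b a h
      simp only [findSplit] at h
      split at h
      · simp at h
        obtain ⟨rfl, rfl⟩ := h
        simp
      · cases hf : findSplit q rest with
        | none => simp [hf] at h
        | some p =>
            simp [hf] at h
            have := ih (b := p.1) (a := p.2) (by simp [hf])
            simp [← h.2]
            omega

-- the while loop over the remaining characters; `none` = ValueError("No closing quotation")
def unquoteAuxB : List Char → Option (List Char)
  | [] => some []
  | c :: rest =>
      if c = '\'' ∨ c = '"' then
        match hf : findSplit c rest with
        | none => none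
        | some (b, a) => (fun l => b ++ l) <$> unquoteAuxB a
      else
        (fun l => c :: l) <$> unquoteAuxB rest
  termination_by l => l.length
  decreasing_by
    · exact Nat.lt_succ_of_lt (findSplit_len hf)
    · simp

def unquote_alt (source : String) : String :=
  ((unquoteAuxB source.toList).getD []).asString

-- ===== PRECONDITION & SPEC =====
-- Pre_ excludes the strings with an unclosed quote, on which Python A raises
-- ValueError("No closing quotation") (and Python B raises the same).
-- Declarative shape: a well-quoted string is a sequence of plain characters and
-- quoted spans q ++ body ++ q whose body does not contain the quote q.
inductive WellQuoted : List Char → Prop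
  | nil : WellQuoted []
  | chr (c : Char) (l : List Char) : ¬(c = '\'' ∨ c = '"') → WellQuoted l → WellQuoted (c :: l)
  | quoted (q : Char) (body l : List Char) : (q = '\'' ∨ q = '"') → q ∉ body → WellQuoted l →
      WellQuoted (q :: (body ++ q :: l))

def Pre_unquote (source : String) : Prop := WellQuoted source.toList

-- decision procedure for WellQuoted (used only by the Decidable instance)
def balancedQuotes : Option Char → List Char → Bool
  | none, [] => true
  | some _, [] => false
  | some t, c :: rest => balancedQuotes (if c = t then none else some t) rest
  | none, c :: rest => balancedQuotes (if c = '\'' ∨ c = '"' then some c else none) rest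

theorem balancedQuotes_some (q : Char) : ∀ (l : List Char),
    balancedQuotes (some q) l = true ↔
      ∃ b r, l = b ++ q :: r ∧ q ∉ b ∧ balancedQuotes none r = true := by
  intro l
  induction l with
  | nil =>
      simp only [balancedQuotes]
      refine ⟨fun h => absurd h (by simp), ?_⟩
      rintro ⟨b, r, heq, -, -⟩
      exact absurd heq (by cases b <;> simp)
  | cons c rest ih =>
      by_cases hc : c = q
      · subst hc
        simp only [balancedQuotes]
        constructor
        · intro h; exact ⟨[], rest, rfl, by simp, h⟩
        · rintro ⟨b, r, heq, hnm, hr⟩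
          cases b with
          | nil => simp at heq; simpa [heq] using hr
          | cons x b' => simp at heq; exact absurd (heq.1 ▸ List.mem_cons_self) hnm
      · simp only [balancedQuotes, if_neg hc, ih]
        constructor
        · rintro ⟨b, r, rfl, hnm, hr⟩
          refine ⟨c :: b, r, rfl, ?_, hr⟩
          simp only [List.mem_cons, not_or]
          exact ⟨fun h => hc h.symm, hnm⟩
        · rintro ⟨b, r, heq, hnm, hr⟩
          cases b with
          | nil => simp at heq; exact absurd heq.1 hc
          | cons x b' =>
              simp at heq
              obtain ⟨rfl, rfl⟩ := heq
              exact ⟨b', r, rfl, fun h => hnm (List.mem_cons_of_mem _ h), hr⟩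

theorem balancedQuotes_iff : ∀ (l : List Char), balancedQuotes none l = true ↔ WellQuoted l := by
  suffices H : ∀ (n : Nat) (l : List Char), l.length ≤ n →
      (balancedQuotes none l = true ↔ WellQuoted l) by
    exact fun l => H l.length l le_rfl
  intro n
  induction n with
  | zero =>
      intro l hl
      have : l = [] := List.eq_nil_of_length_eq_zero (Nat.le_zero.mp hl)
      subst this; simp [balancedQuotes]; exact WellQuoted.nil
  | succ n ih =>
      intro l hl
      cases l with
      | nil => simp [balancedQuotes]; exact WellQuoted.nil
      | cons c rest =>
          have hr : rest.length ≤ n := by simp at hl; omega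
          by_cases hq : c = '\'' ∨ c = '"'
          · simp only [balancedQuotes, if_pos hq, balancedQuotes_some]
            constructor
            · rintro ⟨b, r, rfl, hnm, hbr⟩
              have hrlen : r.length ≤ n := by
                have := hr; simp [List.length_append] at this; omega
              exact WellQuoted.quoted c b r hq hnm ((ih r hrlen).mp hbr)
            · intro hw
              cases hw with
              | chr _ _ h _ => exact absurd hq h
              | quoted q body l' _ hnm hw' =>
                  refine ⟨body, l', rfl, hnm, ?_⟩
                  have hllen : l'.length ≤ n := by
                    simp [List.length_append] at hr; omega
                  exact (ih l' hllen).mpr hw'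
          · simp only [balancedQuotes, if_neg hq, ih rest hr]
            constructor
            · exact fun h => WellQuoted.chr c rest hq h
            · intro hw
              cases hw with
              | chr _ _ _ h => exact h
              | quoted q body l' hq' _ _ => exact absurd hq' hq

instance (source : String) : Decidable (Pre_unquote source) :=
  decidable_of_iff (balancedQuotes none source.toList = true)
    (by unfold Pre_unquote; exact balancedQuotes_iff source.toList)

def pvWitness_unquote : String := "say 'hello \"w\"' now"

def Spec_unquote (source : String) (out : String) : Prop := out = unquote_alt source
instance (source : String) (out : String) : Decidable (Spec_unquote source out) := by unfold Spec_unquote; infer_instance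

-- ===== CLAIM (what is proved, stated in full; the proofs are below) =====
def Claim_equal_unquote : Prop := ∀ (source : String), Dom_unquote source → Pre_unquote source → Spec_unquote source (unquote source)

-- ===== LEMMAS AND PROOFS =====

-- inside quotes, A scans character by character exactly up to the split B's find computes
theorem auxA_some_eq_findSplit (q : Char) : ∀ (l : List Char),
    unquoteAuxA (some q) l =
      match findSplit q l with
      | none => none
      | some (b, a) => (fun t => b ++ t) <$> unquoteAuxA none a := by
  intro l
  induction l with
  | nil => simp [unquoteAuxA, findSplit]
  | cons c rest ih =>
      by_cases hc : c = q
      · subst hc; simp [unquoteAuxA, findSplit]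
      · simp only [unquoteAuxA, findSplit, if_neg hc, ih]
        cases hf : findSplit q rest with
        | none => simp
        | some p =>
            cases hA : unquoteAuxA none p.2 with
            | none => simp [hA]
            | some t => simp [hA]

-- the two option-valued loops agree on every input (failure included)
theorem auxA_eq_auxB : ∀ (l : List Char), unquoteAuxA none l = unquoteAuxB l := by
  suffices H : ∀ (n : Nat) (l : List Char), l.length ≤ n → unquoteAuxA none l = unquoteAuxB l by
    exact fun l => H l.length l le_rfl
  intro n
  induction n with
  | zero =>
      intro l hl
      have : l = [] := List.eq_nil_of_length_eq_zero (Nat.le_zero.mp hl)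
      subst this; simp [unquoteAuxA, unquoteAuxB]
  | succ n ih =>
      intro l hl
      cases l with
      | nil => simp [unquoteAuxA, unquoteAuxB]
      | cons c rest =>
          have hr : rest.length ≤ n := by simp at hl; omega
          by_cases hq : c = '\'' ∨ c = '"'
          · rw [unquoteAuxB]
            simp only [unquoteAuxA, if_pos hq, auxA_some_eq_findSplit]
            cases hf : findSplit c rest with
            | none => simp
            | some p =>
                have hlt : p.2.length < rest.length := findSplit_len (by simpa using hf)
                have := ih p.2 (by omega)
                simp [this]
          · rw [unquoteAuxB]
            simp only [unquoteAuxA, if_neg hq]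
            simp [ih rest hr]

-- ===== VERDICT (by name: the statement is the Claim_ definition above) =====
theorem unquote_spec : Claim_equal_unquote := by
  intro source _ _
  unfold Spec_unquote unquote unquote_alt
  rw [auxA_eq_auxB]
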